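-- pv_equiv track=rewrite | github.com/joelgrus/advent2020 | advent2020/day14_v2.py | apply_multi_mask
-- ===== SOURCE A (Python) =====
-- from typing import Dict, List, Iterator, Iterable
-- import itertools
--
-- def to_binary(value: int, num_digits: int = 36) -> str:
--     return f"{value:36b}".replace(" ", "0")
--
-- def apply_multi_mask(value: int, mask: str) -> Iterator[int]:
--     binary = to_binary(value)
--
--     xs = [i for i, c in enumerate(mask) if c == 'X']
--     sub_values = [['0', '1'] for _ in xs]
--     for choice in itertools.product(*sub_values):
--         new_binary = list(binary)
--         it = iter(choice)
--
--         for i, (vb, mb) in enumerate(zip(binary, mask)):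
--             if mb == '0':
--                 pass
--             elif mb == '1':
--                 new_binary[i] = '1'
--             else:
--                 new_binary[i] = next(it)
--
--         yield int(''.join(new_binary), 2)
-- ===== SOURCE B (Python) =====
-- def apply_multi_mask(value, mask):
--     # One pass over the mask keeps an integer accumulator: set the bit where the
--     # mask says '1', clear it (and remember its weight) where it says 'X'; the
--     # 2^k results are then produced by iteratively doubling a list of integers.
--     base = value
--     weights = []
--     for i, c in enumerate(mask):
--         w = 1 << (35 - i)
--         if c == '1':
--             base |= w
--         elif c == 'X':
--             base &= ~w
--             weights.append(w)
--         elif c != '0':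
--             raise ValueError(f"invalid mask character: {c!r}")
--     results = [base]
--     for w in weights:
--         results = [r + b for r in results for b in (0, w)]
--     yield from results
-- ===== Notes on version B (the rewrite author's own statement) =====
-- stated objective: faster
-- what changed: B replaces A's per-choice rebuild-and-reparse of a 36-character binary string with one integer pass over the mask (set the bit on '1', clear it and record its weight on 'X'), then materialises the 2^k results by iteratively doubling an integer list; Pre_ excludes masks with characters outside 0/1/X and negative values whose sign slot is not overwritten (A raises there), and masks longer than 36 characters, where A's never-substituted trailing characters only duplicate outputs (an artefact of the fixed 36-char zip) while B raises.
-- intended difference: On negative values (inside Pre_, i.e. where the mask overwrites the '-' that A's fixed-width rendering puts into the 36-char field) A returns results computed from the magnitude |value|, an artefact of the string rendering; B applies the mask to value's own two's-complement bits and returns the corresponding negative results, the natural arithmetic reading of this unspecified corner. — e.g. on apply_multi_mask(-2147483648, "000X"): A returns [2147483648, 6442450944], B returns [-6442450944, -2147483648]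
-- outside the precondition, e.g. on apply_multi_mask(3, '000000000000000000000000000000000000X'): A returns [3, 3], B raises ValueError
import Mathlib
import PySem

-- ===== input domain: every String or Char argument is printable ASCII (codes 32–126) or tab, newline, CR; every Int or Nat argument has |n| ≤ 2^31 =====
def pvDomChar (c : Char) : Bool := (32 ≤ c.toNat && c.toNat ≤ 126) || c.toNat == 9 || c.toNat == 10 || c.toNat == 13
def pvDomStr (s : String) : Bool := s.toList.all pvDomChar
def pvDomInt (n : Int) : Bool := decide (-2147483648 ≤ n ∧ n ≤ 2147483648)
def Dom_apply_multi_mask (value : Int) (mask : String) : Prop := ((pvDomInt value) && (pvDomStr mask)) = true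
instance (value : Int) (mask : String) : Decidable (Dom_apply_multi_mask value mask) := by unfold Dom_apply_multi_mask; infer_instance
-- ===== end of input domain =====

-- B replaces A's per-choice rebuild-and-reparse of the 36-char binary string by one
-- integer pass (set/clear mask bits on an accumulator, collect X bit-weights) and an
-- iteratively doubled result list.


-- ===== PORT A =====

-- binary digits of a natural number, most significant first ([] for 0)
def pvBin (n : Nat) : List Char :=
  if h : n = 0 then []
  else pvBin (n / 2) ++ [if n % 2 = 1 then '1' else '0']
  decreasing_by exact Nat.div_lt_self (Nat.pos_of_ne_zero h) (by omega)

-- f"{value:36b}".replace(" ", "0"), ported by hand (exact for this format spec: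
-- right-aligned in a width-36 field, '-' sign for negatives, spaces then zeroed)
def pvToBinary (value : Int) : List Char :=
  let digits := if value.natAbs = 0 then ['0'] else pvBin value.natAbs
  let s := if value < 0 then '-' :: digits else digits
  (List.replicate (36 - s.length) ' ' ++ s).map (fun c => if c = ' ' then '0' else c)

-- xs = [i for i, c in enumerate(mask) if c == 'X']
def pvXs (ms : List Char) : List Int :=
  (PySem.List.enumerate ms 0).filterMap (fun ic => if ic.2 = 'X' then some ic.1 else none)

-- itertools.product(*[['0','1']] * k): all length-k tuples, first coordinate slowest
def pvChoices : Nat → List (List Char)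
  | 0 => [[]]
  | k + 1 => (pvChoices k).map ('0' :: ·) ++ (pvChoices k).map ('1' :: ·)

-- the inner `for i, (vb, mb) in enumerate(zip(binary, mask))` loop building new_binary;
-- `none` models the exhausted iterator (Python: StopIteration -> RuntimeError)
def pvSubst : List (Char × Char) → List Char → Option (List Char)
  | [], _ => some []
  | (vb, mb) :: rest, it =>
    if mb = '0' then (pvSubst rest it).map (vb :: ·)
    else if mb = '1' then (pvSubst rest it).map ('1' :: ·)
    else
      match it with
      | [] => none
      | c :: it' => (pvSubst rest it').map (c :: ·)

-- int(''.join(new_binary), 2); exact when all chars are '0'/'1' (guaranteed inside Pre_)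
def pvParse (l : List Char) : Int :=
  l.foldl (fun a c => 2 * a + (if c = '1' then 1 else 0)) 0

def apply_multi_mask (value : Int) (mask : String) : List Int :=
  let binary := pvToBinary value
  let ms := mask.toList
  let k := (pvXs ms).length
  (pvChoices k).filterMap (fun choice =>
    (pvSubst (binary.zip ms) choice).map (fun nb => pvParse (nb ++ binary.drop ms.length)))

-- ===== PORT B =====

-- loop body of B's single pass: w = 1 << (35 - i); '1' does base |= w, 'X' does
-- base &= ~w and appends w to the weights; '|', '&', '~' are Int.lor/land/not
-- ('.toNat' clamps the exponent where Python's 1 << (35-i) raises: i > 35, outside Pre_;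
-- the final `elif c != '0': raise ValueError` fires only outside Pre_, so the else
-- branch of the port just returns the accumulator)
def pvStepAlt (acc : Int × List Int) (ic : Int × Char) : Int × List Int :=
  let w : Int := 2 ^ (35 - ic.1).toNat
  if ic.2 = '1' then (Int.lor acc.1 w, acc.2)
  else if ic.2 = 'X' then (Int.land acc.1 (Int.not w), acc.2 ++ [w])
  else acc

def apply_multi_mask_alt (value : Int) (mask : String) : List Int :=
  let bw := (PySem.List.enumerate mask.toList 0).foldl pvStepAlt (value, ([] : List Int))
  bw.2.foldl (fun rs w => rs.flatMap (fun r => [r, r + w])) [bw.1]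

-- ===== PRECONDITION & SPEC =====
-- Pre_ excludes exactly the inputs on which A raises: masks with a character other
-- than '0'/'1'/'X' (RuntimeError: the substitution loop exhausts the X-choice
-- iterator), and negative values whose '-' sign slot in the 36-char field is not
-- overwritten by a '1'/'X' mask character (ValueError: the '-' survives into
-- int(...,2)).  It also excludes masks longer than 36 characters, where A still
-- returns but its trailing characters are never substituted (trailing 'X's only
-- duplicate outputs) — a defensible-corner artefact of the fixed 36-char zip.
def Pre_apply_multi_mask (value : Int) (mask : String) : Prop :=
  mask.toList.length ≤ 36 ∧
  (mask.toList.all (fun c => c == '0' || c == '1' || c == 'X')) = true ∧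
  (0 ≤ value ∨
    (35 - Nat.size value.natAbs < mask.toList.length ∧
     mask.toList.getD (35 - Nat.size value.natAbs) ' ' ≠ '0'))
instance (value : Int) (mask : String) : Decidable (Pre_apply_multi_mask value mask) := by
  unfold Pre_apply_multi_mask; infer_instance

def pvWitness_apply_multi_mask : Int × String := (5, "1X0X")

-- On negative values A renders the 36-char field of |value| with a '-' in it and (when
-- the mask overwrites that '-') returns results computed from the magnitude |value|, an
-- artefact of the fixed-width string rendering; B applies the mask to value's own
-- two's-complement bits and returns the corresponding negative results, the natural
-- arithmetic reading of this unspecified corner.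
def D_apply_multi_mask (value : Int) (mask : String) : Prop := value < 0
instance (value : Int) (mask : String) : Decidable (D_apply_multi_mask value mask) := by
  unfold D_apply_multi_mask; infer_instance

def Spec_apply_multi_mask (value : Int) (mask : String) (out : List Int) : Prop := ¬ D_apply_multi_mask value mask → out = apply_multi_mask_alt value mask
instance (value : Int) (mask : String) (out : List Int) : Decidable (Spec_apply_multi_mask value mask out) := by unfold Spec_apply_multi_mask; infer_instance

def pvDiffWitness_apply_multi_mask : Int × String := (-2147483648, "000X")
def pvDiffWitnessOut_apply_multi_mask : (List Int) × (List Int) :=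
  ([2147483648, 6442450944], [-6442450944, -2147483648])

-- ===== CLAIM (what is proved, stated in full; the proofs are below) =====
def Claim_unchanged_apply_multi_mask : Prop := ∀ (value : Int) (mask : String), Dom_apply_multi_mask value mask → Pre_apply_multi_mask value mask → Spec_apply_multi_mask value mask (apply_multi_mask value mask)
def Claim_changed_apply_multi_mask : Prop := Dom_apply_multi_mask (pvDiffWitness_apply_multi_mask.1) (pvDiffWitness_apply_multi_mask.2) ∧ Pre_apply_multi_mask (pvDiffWitness_apply_multi_mask.1) (pvDiffWitness_apply_multi_mask.2) ∧ D_apply_multi_mask (pvDiffWitness_apply_multi_mask.1) (pvDiffWitness_apply_multi_mask.2) ∧ apply_multi_mask (pvDiffWitness_apply_multi_mask.1) (pvDiffWitness_apply_multi_mask.2) = pvDiffWitnessOut_apply_multi_mask.1 ∧ apply_multi_mask_alt (pvDiffWitness_apply_multi_mask.1) (pvDiffWitness_apply_multi_mask.2) = pvDiffWitnessOut_apply_multi_mask.2 ∧ pvDiffWitnessOut_apply_multi_mask.1 ≠ pvDiffWitnessOut_apply_multi_mask.2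

def Claim_exact_apply_multi_mask : Prop := ∀ (value : Int) (mask : String), Dom_apply_multi_mask value mask → Pre_apply_multi_mask value mask → D_apply_multi_mask value mask → apply_multi_mask value mask ≠ apply_multi_mask_alt value mask

-- ===== LEMMAS AND PROOFS =====

-- proof-side helpers

-- MSB-first parse with accumulator (pvParse l = pvParseF l 0)
def pvParseF (l : List Char) (a : Int) : Int :=
  l.foldl (fun a c => 2 * a + (if c = '1' then 1 else 0)) a

-- W-bit binary rendering of n, MSB first
def pvBits (W n : Nat) : List Char :=
  (List.range W).map (fun i => if n.testBit (W - 1 - i) then '1' else '0')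

-- joint recursion computing the (mask contribution, X weights) of a binary/mask pair
def pvBW : List Char → List Char → Int × List Int
  | _, [] => (0, [])
  | [], _ :: _ => (0, [])
  | b :: bs, m :: ms =>
    let p := pvBW bs ms
    if m = '1' then (2 ^ bs.length + p.1, p.2)
    else if m = '0' then ((if b = '1' then (1 : Int) else 0) * 2 ^ bs.length + p.1, p.2)
    else (p.1, (2 : Int) ^ bs.length :: p.2)

def pvDot : List Char → List Int → Int
  | c :: cs, w :: ws => (if c = '1' then w else 0) + pvDot cs ws
  | _, _ => 0

theorem pvParseF_horner (l : List Char) (a : Int) :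
    pvParseF l a = a * 2 ^ l.length + pvParseF l 0 := by
  induction l generalizing a with
  | nil => simp [pvParseF]
  | cons c l ih =>
    have h1 : pvParseF (c :: l) a = pvParseF l (2 * a + (if c = '1' then 1 else 0)) := rfl
    have h2 : pvParseF (c :: l) 0 = pvParseF l (2 * 0 + (if c = '1' then 1 else 0)) := rfl
    rw [h1, h2, ih, ih (2 * 0 + _)]
    simp only [List.length_cons, pow_succ]
    split <;> ring

theorem pvDot_nil (ch : List Char) : pvDot ch [] = 0 := by
  cases ch <;> rfl

theorem pvBW_one (b : Char) (bs ms : List Char) :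
    pvBW (b :: bs) ('1' :: ms) = (2 ^ bs.length + (pvBW bs ms).1, (pvBW bs ms).2) := by
  simp [pvBW]

theorem pvBW_zero (b : Char) (bs ms : List Char) :
    pvBW (b :: bs) ('0' :: ms) =
      ((if b = '1' then (1 : Int) else 0) * 2 ^ bs.length + (pvBW bs ms).1, (pvBW bs ms).2) := by
  simp [pvBW]

theorem pvBW_other (b : Char) (bs : List Char) (m : Char) (ms : List Char)
    (h1 : m ≠ '1') (h0 : m ≠ '0') :
    pvBW (b :: bs) (m :: ms) = ((pvBW bs ms).1, (2 : Int) ^ bs.length :: (pvBW bs ms).2) := by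
  simp [pvBW, h1, h0]

-- core: per-choice value of A's substitution loop, in terms of pvBW/pvDot
theorem pvCore (ms : List Char) : ∀ (bs ch : List Char) (a : Int),
    ms.length ≤ bs.length →
    (∀ c ∈ ms, c = '0' ∨ c = '1' ∨ c = 'X') →
    (ms.filter (fun c => c = 'X')).length ≤ ch.length →
    ∃ nb, pvSubst (bs.zip ms) ch = some nb ∧
      pvParseF (nb ++ bs.drop ms.length) a =
        a * 2 ^ bs.length + (pvBW bs ms).1 + pvDot ch (pvBW bs ms).2 +
          pvParseF (bs.drop ms.length) 0 := by
  induction ms with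
  | nil =>
    intro bs ch a _ _ _
    refine ⟨[], by simp [pvSubst], ?_⟩
    simp only [List.length_nil, List.drop_zero, List.nil_append, pvBW, pvDot_nil]
    rw [pvParseF_horner]
    ring
  | cons m ms ih =>
    intro bs ch a hlen hab hcnt
    cases bs with
    | nil => simp at hlen
    | cons b bs =>
      simp only [List.length_cons, Nat.add_le_add_iff_right] at hlen
      have hab' : ∀ c ∈ ms, c = '0' ∨ c = '1' ∨ c = 'X' := fun c hc => hab c (by simp [hc])
      by_cases h0 : m = '0'
      · subst h0
        have hcnt' : (ms.filter (fun c => c = 'X')).length ≤ ch.length := by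
          simpa using hcnt
        obtain ⟨nb, hnb, heq⟩ := ih bs ch (2 * a + (if b = '1' then 1 else 0)) hlen hab' hcnt'
        refine ⟨b :: nb, ?_, ?_⟩
        · simp [pvSubst, hnb]
        · have hstep : pvParseF (b :: (nb ++ bs.drop ms.length)) a =
              pvParseF (nb ++ bs.drop ms.length) (2 * a + (if b = '1' then 1 else 0)) := rfl
          simp only [List.length_cons, List.drop_succ_cons, List.cons_append, pvBW_zero]
          rw [hstep, heq]
          simp only [pow_succ]
          split <;> ring
      · by_cases h1 : m = '1'
        · subst h1
          have hcnt' : (ms.filter (fun c => c = 'X')).length ≤ ch.length := by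
            simpa using hcnt
          obtain ⟨nb, hnb, heq⟩ := ih bs ch (2 * a + 1) hlen hab' hcnt'
          refine ⟨'1' :: nb, ?_, ?_⟩
          · simp [pvSubst, hnb]
          · have hstep : pvParseF ('1' :: (nb ++ bs.drop ms.length)) a =
                pvParseF (nb ++ bs.drop ms.length) (2 * a + 1) := by
              simp [pvParseF]
            simp only [List.length_cons, List.drop_succ_cons, List.cons_append, pvBW_one]
            rw [hstep, heq]
            simp only [pow_succ]
            ring
        · have hX : m = 'X' := by rcases hab m (by simp) with h | h | h <;> simp_all
          subst hX
          cases ch with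
          | nil => simp at hcnt
          | cons c ch' =>
            have hcnt' : (ms.filter (fun c => c = 'X')).length ≤ ch'.length := by
              simpa using hcnt
            obtain ⟨nb, hnb, heq⟩ := ih bs ch' (2 * a + (if c = '1' then 1 else 0)) hlen hab' hcnt'
            refine ⟨c :: nb, ?_, ?_⟩
            · simp [pvSubst, hnb]
            · have hstep : pvParseF (c :: (nb ++ bs.drop ms.length)) a =
                  pvParseF (nb ++ bs.drop ms.length) (2 * a + (if c = '1' then 1 else 0)) := rfl
              simp only [List.length_cons, List.drop_succ_cons, List.cons_append,
                pvBW_other b bs 'X' ms (by decide) (by decide), pvDot]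
              rw [hstep, heq]
              simp only [pow_succ]
              split <;> ring

theorem pvChoices_length {k : Nat} {ch : List Char} (h : ch ∈ pvChoices k) :
    ch.length = k := by
  induction k generalizing ch with
  | zero => simp [pvChoices] at h; simp [h]
  | succ k ih =>
    simp only [pvChoices, List.mem_append, List.mem_map] at h
    rcases h with ⟨ch', h', rfl⟩ | ⟨ch', h', rfl⟩ <;> simp [ih h']

theorem pvFoldlDouble_append (ws xs ys : List Int) :
    ws.foldl (fun rs w => rs.flatMap (fun r => [r, r + w])) (xs ++ ys) =
      ws.foldl (fun rs w => rs.flatMap (fun r => [r, r + w])) xs ++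
      ws.foldl (fun rs w => rs.flatMap (fun r => [r, r + w])) ys := by
  induction ws generalizing xs ys with
  | nil => simp
  | cons w ws ih => simp only [List.foldl_cons, List.flatMap_append, ih]

theorem pvFoldlDouble (ws : List Int) (base : Int) :
    ws.foldl (fun rs w => rs.flatMap (fun r => [r, r + w])) [base] =
      (pvChoices ws.length).map (fun ch => base + pvDot ch ws) := by
  induction ws generalizing base with
  | nil => simp [pvChoices, pvDot]
  | cons w ws ih =>
    simp only [List.foldl_cons, List.length_cons, pvChoices, List.map_append, List.map_map]
    have : ([base, base + w] : List Int) = [base] ++ [base + w] := rfl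
    rw [show (([base] : List Int).flatMap (fun r => [r, r + w])) = [base] ++ [base + w] by simp]
    rw [pvFoldlDouble_append, ih base, ih (base + w)]
    congr 1 <;> apply List.map_congr_left <;> intro ch hch <;>
      simp [Function.comp, pvDot] <;> try ring

theorem pvFilterMap_eq_map {α β : Type} (l : List α) (f : α → Option β) (g : α → β)
    (h : ∀ x ∈ l, f x = some (g x)) : l.filterMap f = l.map g := by
  induction l with
  | nil => simp
  | cons x l ih =>
    simp only [List.filterMap_cons, List.map_cons, h x (by simp)]
    rw [ih (fun y hy => h y (by simp [hy]))]

theorem pvXs_length (ms : List Char) :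
    (pvXs ms).length = (ms.filter (fun c => c = 'X')).length := by
  have : ∀ (s : Int), ((PySem.List.enumerate ms s).filterMap
      (fun ic => if ic.2 = 'X' then some ic.1 else none)).length =
      (ms.filter (fun c => c = 'X')).length := by
    induction ms with
    | nil => intro s; simp [PySem.List.enumerate_nil]
    | cons c ms ih =>
      intro s
      rw [PySem.List.enumerate_cons]
      by_cases hc : c = 'X' <;> simp [List.filterMap_cons, hc, ih]
  exact this 0

theorem pvBW_weights_length (ms : List Char) : ∀ bs : List Char,
    ms.length ≤ bs.length →
    (∀ c ∈ ms, c = '0' ∨ c = '1' ∨ c = 'X') →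
    (pvBW bs ms).2.length = (ms.filter (fun c => c = 'X')).length := by
  induction ms with
  | nil => intro bs _ _; simp [pvBW]
  | cons m ms ih =>
    intro bs hlen hab
    cases bs with
    | nil => simp at hlen
    | cons b bs =>
      simp only [List.length_cons, Nat.add_le_add_iff_right] at hlen
      have hab' : ∀ c ∈ ms, c = '0' ∨ c = '1' ∨ c = 'X' := fun c hc => hab c (by simp [hc])
      by_cases h1 : m = '1'
      · simp [pvBW, h1, ih bs hlen hab']
      · by_cases h0 : m = '0'
        · simp [pvBW, h0, h1, ih bs hlen hab']
        · have hX : m = 'X' := by rcases hab m (by simp) with h|h|h <;> simp_all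
          simp [pvBW, h0, h1, hX, ih bs hlen hab']

theorem pvBits_succ (W n : Nat) :
    pvBits (W + 1) n = (if n.testBit W then '1' else '0') :: pvBits W n := by
  simp only [pvBits, List.range_succ_eq_map, List.map_cons, List.map_map]
  refine List.cons_eq_cons.mpr ⟨by norm_num, ?_⟩
  apply List.map_congr_left
  intro i hi
  simp only [Function.comp_apply]
  rw [show W + 1 - 1 - (i + 1) = W - 1 - i by omega]

theorem pvBits_div2 (W n : Nat) :
    pvBits (W + 1) n = pvBits W (n / 2) ++ [if n % 2 = 1 then '1' else '0'] := by
  simp only [pvBits, List.range_succ, List.map_append, List.map_cons, List.map_nil]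
  congr 1
  · apply List.map_congr_left; intro i hi
    simp only [List.mem_range] at hi
    have h1 : W + 1 - 1 - i = (W - 1 - i) + 1 := by omega
    rw [h1, Nat.testBit_add_one]
  · simp only [List.cons.injEq, and_true]
    rcases Nat.mod_two_eq_zero_or_one n with h | h <;>
      simp [Nat.testBit_zero, h]

theorem pvBits_drop (s W n : Nat) (h : s ≤ W) :
    (pvBits W n).drop s = pvBits (W - s) n := by
  induction s generalizing W with
  | zero => simp
  | succ s ih =>
    cases W with
    | zero => omega
    | succ W =>
      rw [pvBits_succ, List.drop_succ_cons, ih W (by omega)]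
      congr 1
      omega

theorem pvMod_split (v j : Nat) :
    v % 2 ^ (j + 1) = (if v.testBit j then 2 ^ j else 0) + v % 2 ^ j := by
  have h1 : v % 2 ^ (j + 1) = v % 2 ^ j + 2 ^ j * (v / 2 ^ j % 2) := by
    conv_lhs => rw [pow_succ, Nat.mod_mul]
  have h2 : (v.testBit j).toNat = v / 2 ^ j % 2 := Nat.toNat_testBit v j
  rw [h1, ← h2]
  rcases hb : v.testBit j <;> simp [hb] <;> omega

theorem pvBits_parse (W n : Nat) :
    pvParseF (pvBits W n) 0 = ((n % 2 ^ W : Nat) : Int) := by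
  induction W with
  | zero => simp [pvBits, pvParseF]
  | succ W ih =>
    rw [pvBits_succ]
    have hstep : pvParseF ((if n.testBit W then '1' else '0') :: pvBits W n) 0 =
        pvParseF (pvBits W n) (if n.testBit W then 1 else 0) := by
      simp only [pvParseF, List.foldl_cons]
      split <;> simp
    rw [hstep, pvParseF_horner, ih]
    have hlen : (pvBits W n).length = W := by simp [pvBits]
    rw [hlen, pvMod_split n W]
    push_cast
    split <;> simp <;> ring

-- b ||| 2^j sets bit j: with the high part a multiple of 2^(j+1) it adds 2^j and
-- truncates the value's bit j
theorem pvOrBit (a v j : Nat) :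
    (2 ^ (j + 1) * a + v % 2 ^ (j + 1)) ||| 2 ^ j =
      2 ^ (j + 1) * a + (2 ^ j + v % 2 ^ j) := by
  have hb1 : v % 2 ^ (j + 1) < 2 ^ (j + 1) := Nat.mod_lt _ (by positivity)
  have hvz : v % 2 ^ j < 2 ^ j := Nat.mod_lt _ (by positivity)
  have hb2 : 2 ^ j + v % 2 ^ j < 2 ^ (j + 1) := by
    have h : (2:Nat) ^ (j + 1) = 2 ^ j + 2 ^ j := by ring
    omega
  apply Nat.eq_of_testBit_eq
  intro i
  rw [Nat.testBit_or, Nat.testBit_two_pow_mul_add a hb1 i,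
    Nat.testBit_two_pow_mul_add a hb2 i, Nat.testBit_two_pow]
  have hone : ∀ k, (2 ^ j + v % 2 ^ j).testBit k =
      if k < j then (v % 2 ^ j).testBit k else Nat.testBit 1 (k - j) := by
    intro k
    rw [show 2 ^ j + v % 2 ^ j = 2 ^ j * 1 + v % 2 ^ j by ring,
      Nat.testBit_two_pow_mul_add 1 hvz k]
  rcases lt_trichotomy i j with h | h | h
  · rw [if_pos (by omega), if_pos (by omega), hone i, if_pos h,
      Nat.testBit_mod_two_pow, Nat.testBit_mod_two_pow]
    simp [h, Nat.lt_succ_of_lt h]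
    omega
  · subst h
    rw [if_pos (by omega), if_pos (by omega), hone i, if_neg (by omega)]
    simp
  · rw [if_neg (by omega), if_neg (by omega)]
    simp
    omega

-- b & ~(2^j) clears bit j
theorem pvLdiffBit (a v j : Nat) :
    Nat.ldiff (2 ^ (j + 1) * a + v % 2 ^ (j + 1)) (2 ^ j) =
      2 ^ (j + 1) * a + v % 2 ^ j := by
  have hb1 : v % 2 ^ (j + 1) < 2 ^ (j + 1) := Nat.mod_lt _ (by positivity)
  have hvz : v % 2 ^ j < 2 ^ j := Nat.mod_lt _ (by positivity)
  have hb2 : v % 2 ^ j < 2 ^ (j + 1) := by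
    have h : (2:Nat) ^ (j + 1) = 2 ^ j + 2 ^ j := by ring
    omega
  apply Nat.eq_of_testBit_eq
  intro i
  rw [Nat.testBit_ldiff, Nat.testBit_two_pow_mul_add a hb1 i,
    Nat.testBit_two_pow_mul_add a hb2 i, Nat.testBit_two_pow]
  rcases lt_trichotomy i j with h | h | h
  · rw [if_pos (by omega), if_pos (by omega),
      Nat.testBit_mod_two_pow, Nat.testBit_mod_two_pow]
    simp [h, Nat.lt_succ_of_lt h]
    omega
  · subst h
    rw [if_pos (by omega), if_pos (by omega), Nat.testBit_mod_two_pow]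
    simp
  · rw [if_neg (by omega), if_neg (by omega)]
    simp
    omega

theorem pvStep_one (b : Nat) (ws : List Int) (i : Int) :
    pvStepAlt ((b : Int), ws) (i, '1') = ((((b ||| 2 ^ (35 - i).toNat : Nat)) : Int), ws) := by
  have hc : ((2 : Int) ^ (35 - i).toNat) = (((2 ^ (35 - i).toNat : Nat)) : Int) := by
    push_cast; ring
  simp only [pvStepAlt, reduceIte]
  rw [hc]
  simp [Int.lor]

theorem pvStep_X (b : Nat) (ws : List Int) (i : Int) :
    pvStepAlt ((b : Int), ws) (i, 'X') =
      (((Nat.ldiff b (2 ^ (35 - i).toNat) : Nat) : Int), ws ++ [(2 : Int) ^ (35 - i).toNat]) := by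
  have hc : ((2 : Int) ^ (35 - i).toNat) = (((2 ^ (35 - i).toNat : Nat)) : Int) := by
    push_cast; ring
  simp only [pvStepAlt]
  rw [if_neg (by decide), if_pos trivial]
  have hland : ((b : Int)).land ((((2 ^ (35 - i).toNat : Nat)) : Int)).not
      = (((Nat.ldiff b (2 ^ (35 - i).toNat) : Nat)) : Int) := by
    simp [Int.land, Int.not]
  rw [hc, hland]

theorem pvStep_other (b : Int) (ws : List Int) (i : Int) (m : Char)
    (h1 : m ≠ '1') (hX : m ≠ 'X') :
    pvStepAlt (b, ws) (i, m) = (b, ws) := by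
  simp [pvStepAlt, h1, hX]

-- invariant of B's fold: the accumulator is (high bits already forced) + (v's low bits)
theorem pvEnumFoldB (v : Nat) (ms : List Char) : ∀ (s a : Nat) (ws : List Int),
    s + ms.length ≤ 36 →
    (∀ c ∈ ms, c = '0' ∨ c = '1' ∨ c = 'X') →
    (PySem.List.enumerate ms (s : Int)).foldl pvStepAlt
        ((((2 ^ (36 - s) * a + v % 2 ^ (36 - s) : Nat)) : Int), ws) =
      (((2 ^ (36 - s) * a : Nat) : Int) + (pvBW ((pvBits 36 v).drop s) ms).1 +
        ((v % 2 ^ (36 - s - ms.length) : Nat) : Int),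
       ws ++ (pvBW ((pvBits 36 v).drop s) ms).2) := by
  induction ms with
  | nil =>
    intro s a ws _ _
    simp [PySem.List.enumerate_nil, pvBW]
  | cons m ms ih =>
    intro s a ws hle hab
    simp only [List.length_cons] at hle
    have hab' : ∀ c ∈ ms, c = '0' ∨ c = '1' ∨ c = 'X' := fun c hc => hab c (by simp [hc])
    have hs : s ≤ 35 := by omega
    have hj : 36 - s = (35 - s) + 1 := by omega
    have hj' : 36 - (s + 1) = 35 - s := by omega
    have hdrop : (pvBits 36 v).drop s =
        (if v.testBit (35 - s) then '1' else '0') :: (pvBits 36 v).drop (s + 1) := by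
      rw [pvBits_drop s 36 v (by omega), pvBits_drop (s + 1) 36 v (by omega), hj, pvBits_succ, hj']
    have hto : ((35 : Int) - (s : Int)).toNat = 35 - s := by omega
    have hlen2 : ((pvBits 36 v).drop (s + 1)).length = 35 - s := by
      rw [pvBits_drop (s + 1) 36 v (by omega)]; simp [pvBits]
    have hcast : ((s : Int) + 1) = (((s + 1 : Nat)) : Int) := by push_cast; ring
    have htail : 36 - s - (ms.length + 1) = 36 - (s + 1) - ms.length := by omega
    rw [PySem.List.enumerate_cons, List.foldl_cons, hcast]
    rcases hab m (by simp) with h0 | h1 | hX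
    · -- '0': the step leaves the accumulator; v's bit at 35-s moves to the high part
      subst h0
      rw [pvStep_other _ _ _ '0' (by decide) (by decide)]
      have hsplit : 2 ^ (36 - s) * a + v % 2 ^ (36 - s) =
          2 ^ (36 - (s + 1)) * (2 * a + (v.testBit (35 - s)).toNat) + v % 2 ^ (36 - (s + 1)) := by
        rw [hj, hj', pvMod_split v (35 - s)]
        rcases hb : v.testBit (35 - s) <;> simp [hb] <;> ring
      rw [hsplit, ih (s + 1) (2 * a + (v.testBit (35 - s)).toNat) ws (by omega) hab', hdrop,
        pvBW_zero, hlen2]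
      simp only [List.length_cons]
      rw [htail]
      have hbit : (if (if v.testBit (35 - s) then '1' else '0') = '1' then (1 : Int) else 0) =
          ((v.testBit (35 - s)).toNat : Int) := by
        rcases hb : v.testBit (35 - s) <;> simp [hb]
      congr 1
      simp only [hbit, hj, hj']
      push_cast
      ring
    · -- '1': base |= w
      subst h1
      rw [pvStep_one, hto, hj, pvOrBit a v (35 - s)]
      have hsplit : 2 ^ ((35 - s) + 1) * a + (2 ^ (35 - s) + v % 2 ^ (35 - s)) =
          2 ^ (36 - (s + 1)) * (2 * a + 1) + v % 2 ^ (36 - (s + 1)) := by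
        rw [hj']; ring
      rw [hsplit, ih (s + 1) (2 * a + 1) ws (by omega) hab', hdrop, pvBW_one, hlen2]
      simp only [List.length_cons]
      rw [show 35 - s + 1 - (ms.length + 1) = 36 - (s + 1) - ms.length from by omega]
      congr 1
      simp only [hj, hj']
      push_cast
      ring
    · -- 'X': base &= ~w, weight appended
      subst hX
      rw [pvStep_X, hto, hj, pvLdiffBit a v (35 - s)]
      have hsplit : 2 ^ ((35 - s) + 1) * a + v % 2 ^ (35 - s) =
          2 ^ (36 - (s + 1)) * (2 * a) + v % 2 ^ (36 - (s + 1)) := by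
        rw [hj']
        ring
      rw [hsplit, ih (s + 1) (2 * a) (ws ++ [(2 : Int) ^ (35 - s)]) (by omega) hab', hdrop,
        pvBW_other _ _ 'X' ms (by decide) (by decide), hlen2]
      simp only [List.length_cons]
      rw [show 35 - s + 1 - (ms.length + 1) = 36 - (s + 1) - ms.length from by omega]
      congr 1
      · simp only [hj, hj']
        push_cast
        ring
      · simp [List.append_assoc]

theorem pvBin_pos (n : Nat) (hn : n ≠ 0) :
    pvBin n = pvBin (n / 2) ++ [if n % 2 = 1 then '1' else '0'] := by
  rw [pvBin]
  exact dif_neg hn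

theorem pvBin_chars (n : Nat) : ∀ c ∈ pvBin n, c = '0' ∨ c = '1' := by
  induction n using pvBin.induct with
  | case1 => simp [pvBin]
  | case2 n h ih =>
    rw [pvBin_pos n h]
    intro c hc
    rcases List.mem_append.1 hc with h1 | h1
    · exact ih c h1
    · simp at h1; subst h1; split <;> simp

theorem pvBits_zero (W : Nat) : pvBits W 0 = List.replicate W '0' := by
  apply List.ext_getElem <;> simp [pvBits]

theorem pvBits_eq_pad (n : Nat) : ∀ W : Nat, n < 2 ^ W →
    pvBits W n = List.replicate (W - (pvBin n).length) '0' ++ pvBin n := by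
  induction n using pvBin.induct with
  | case1 =>
    intro W hW
    rw [pvBin]
    simp [pvBits_zero]
  | case2 n hn ih =>
    intro W hW
    cases W with
    | zero => omega
    | succ W =>
      have hdiv : n / 2 < 2 ^ W := by
        have h2 : 2 ^ (W + 1) = 2 * 2 ^ W := by ring
        omega
      rw [pvBits_div2, ih W hdiv]
      conv_rhs => rw [pvBin_pos n hn]
      have hlen3 : (pvBin (n / 2) ++ [if n % 2 = 1 then '1' else '0']).length =
          (pvBin (n / 2)).length + 1 := by simp
      rw [hlen3, show W + 1 - ((pvBin (n / 2)).length + 1) = W - (pvBin (n / 2)).length by omega,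
        List.append_assoc]

-- padded map over the digits is the identity
theorem pvBin_map_id (n : Nat) :
    (pvBin n).map (fun c => if c = ' ' then '0' else c) = pvBin n := by
  conv_rhs => rw [← List.map_id (pvBin n)]
  apply List.map_congr_left
  intro c hc
  rcases pvBin_chars n c hc with h | h <;> simp [h]

-- f"{v:36b}".replace(" ","0") = 36-bit rendering, for 0 ≤ v < 2^36
theorem pvToBinary_nonneg (value : Int) (h0 : 0 ≤ value) (h1 : value.natAbs < 2 ^ 36) :
    pvToBinary value = pvBits 36 value.natAbs := by
  have hv0 : ¬ value < 0 := by omega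
  by_cases hz : value.natAbs = 0
  · have hL : pvToBinary value =
        (List.replicate (36 - 1) ' ' ++ ['0']).map (fun c => if c = ' ' then '0' else c) := by
      simp [pvToBinary, hz, hv0]
    rw [hL, hz]
    decide
  · have hL : pvToBinary value =
        List.replicate (36 - (pvBin value.natAbs).length) '0' ++ pvBin value.natAbs := by
      simp [pvToBinary, hz, hv0, List.map_append, List.map_replicate, pvBin_map_id]
    rw [hL, pvBits_eq_pad value.natAbs 36 h1]

-- ===== VERDICT (by name: the statement is the Claim_ definition above) =====
theorem apply_multi_mask_spec : Claim_unchanged_apply_multi_mask := by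
  intro value mask hdom hpre
  unfold Spec_apply_multi_mask
  intro hnd
  have h0 : 0 ≤ value := by
    unfold D_apply_multi_mask at hnd
    omega
  obtain ⟨hlen, hball, -⟩ := hpre
  have hab : ∀ c ∈ mask.toList, c = '0' ∨ c = '1' ∨ c = 'X' := by
    intro c hc
    have h2 : (c = '0' ∨ c = '1') ∨ c = 'X' := by
      simpa using List.all_eq_true.mp hball c hc
    tauto
  have hdomv : value.natAbs ≤ 2147483648 := by
    simp only [Dom_apply_multi_mask, pvDomInt, Bool.and_eq_true, decide_eq_true_eq] at hdom
    omega
  have h36 : value.natAbs < 2 ^ 36 := by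
    have : (2:Nat) ^ 36 = 68719476736 := by norm_num
    omega
  set v := value.natAbs with hv
  have hbin := pvToBinary_nonneg value h0 h36
  have hbslen : (pvBits 36 v).length = 36 := by simp [pvBits]
  have hlen' : mask.toList.length ≤ (pvBits 36 v).length := by omega
  have htail : pvParseF ((pvBits 36 v).drop mask.toList.length) 0 =
      ((v % 2 ^ (36 - mask.toList.length) : Nat) : Int) := by
    rw [pvBits_drop _ _ _ hlen, pvBits_parse]
  have hA : apply_multi_mask value mask = (pvChoices (pvXs mask.toList).length).map
      (fun ch => (pvBW (pvBits 36 v) mask.toList).1 +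
        pvDot ch (pvBW (pvBits 36 v) mask.toList).2 +
        pvParseF ((pvBits 36 v).drop mask.toList.length) 0) := by
    simp only [apply_multi_mask, hbin]
    apply pvFilterMap_eq_map
    intro ch hch
    have hchlen := pvChoices_length hch
    obtain ⟨nb, hnb, heq⟩ := pvCore mask.toList (pvBits 36 v) ch 0 hlen' hab
      (by rw [hchlen, pvXs_length])
    rw [hnb]
    have hval : pvParse (nb ++ (pvBits 36 v).drop mask.toList.length) =
        (pvBW (pvBits 36 v) mask.toList).1 +
          pvDot ch (pvBW (pvBits 36 v) mask.toList).2 +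
          pvParseF ((pvBits 36 v).drop mask.toList.length) 0 := by
      have hpp : pvParse (nb ++ (pvBits 36 v).drop mask.toList.length) =
          pvParseF (nb ++ (pvBits 36 v).drop mask.toList.length) 0 := rfl
      rw [hpp, heq]
      ring
    simp only [Option.map_some]
    rw [hval]
  have hw := pvBW_weights_length mask.toList (pvBits 36 v) hlen' hab
  have hB : apply_multi_mask_alt value mask =
      (pvChoices (pvBW (pvBits 36 v) mask.toList).2.length).map
      (fun ch => ((pvBW (pvBits 36 v) mask.toList).1 +
        pvParseF ((pvBits 36 v).drop mask.toList.length) 0) +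
        pvDot ch (pvBW (pvBits 36 v) mask.toList).2) := by
    have h36' : v < 2 ^ 36 := h36
    have hvalue : value = ((v : Nat) : Int) := by omega
    have hE := pvEnumFoldB v mask.toList 0 0 [] (by omega) hab
    simp only [Nat.sub_zero, Nat.mul_zero, Nat.zero_add, Nat.cast_zero, List.drop_zero,
      List.nil_append, zero_add] at hE
    rw [Nat.mod_eq_of_lt h36'] at hE
    simp only [apply_multi_mask_alt]
    rw [hvalue, hE, pvFoldlDouble, ← htail]
  rw [hA, hB, hw, pvXs_length]
  apply List.map_congr_left
  intro ch _
  ring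

theorem pvBin_two_pow (k : Nat) : pvBin (2 ^ k) = '1' :: List.replicate k '0' := by
  induction k with
  | zero =>
    rw [show (2 : Nat) ^ 0 = 1 from rfl, pvBin_pos 1 (by norm_num)]
    simp [pvBin]
  | succ k ih =>
    rw [pvBin_pos (2 ^ (k + 1)) (by positivity),
      show 2 ^ (k + 1) / 2 = 2 ^ k from by rw [pow_succ]; omega,
      show 2 ^ (k + 1) % 2 = 0 from by rw [pow_succ]; omega, ih]
    simp [List.replicate_succ']

theorem pvWitA : apply_multi_mask (-2147483648) "000X" = [2147483648, 6442450944] := by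
  have h1 : pvBin 2147483648 = '1' :: List.replicate 31 '0' := by
    rw [show (2147483648 : Nat) = 2 ^ 31 from by norm_num, pvBin_two_pow]
  have hb : pvToBinary (-2147483648) =
      ['0', '0', '0', '-', '1'] ++ List.replicate 31 '0' := by
    simp [pvToBinary, h1]
  simp only [apply_multi_mask, hb]
  decide

theorem apply_multi_mask_changed : Claim_changed_apply_multi_mask := by
  unfold Claim_changed_apply_multi_mask
  refine ⟨by decide, by decide, by decide, pvWitA, by decide, by decide⟩

theorem pvParseF_nonneg (l : List Char) : ∀ a : Int, 0 ≤ a → 0 ≤ pvParseF l a := by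
  induction l with
  | nil => intro a ha; simpa [pvParseF] using ha
  | cons c l ih =>
    intro a ha
    have h1 : pvParseF (c :: l) a = pvParseF l (2 * a + (if c = '1' then 1 else 0)) := rfl
    rw [h1]
    apply ih
    split <;> omega

theorem pvA_mem_nonneg (value : Int) (mask : String) (x : Int)
    (hx : x ∈ apply_multi_mask value mask) : 0 ≤ x := by
  simp only [apply_multi_mask, List.mem_filterMap] at hx
  obtain ⟨ch, -, hch⟩ := hx
  rcases hs : pvSubst ((pvToBinary value).zip mask.toList) ch with _ | nb
  · rw [hs] at hch; simp at hch
  · rw [hs] at hch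
    simp only [Option.map_some, Option.some.injEq] at hch
    rw [← hch]
    exact pvParseF_nonneg _ 0 le_rfl

theorem pvStep_neg (b : Int) (ws : List Int) (ic : Int × Char) (hb : b < 0) :
    (pvStepAlt (b, ws) ic).1 < 0 := by
  obtain ⟨m, rfl⟩ : ∃ m, b = Int.negSucc m := by
    refine ⟨(-b - 1).toNat, ?_⟩
    rw [Int.negSucc_eq]
    omega
  have h2 : ((2 : Int) ^ (35 - ic.1).toNat) = Int.ofNat (2 ^ (35 - ic.1).toNat) := by
    rw [Int.ofNat_eq_natCast]
    push_cast; ring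
  simp only [pvStepAlt]
  split_ifs
  · show (Int.lor (Int.negSucc m) (2 ^ (35 - ic.1).toNat)) < 0
    rw [h2]
    simp only [Int.lor]
    rw [Int.negSucc_eq]
    omega
  · show (Int.land (Int.negSucc m) (Int.not (2 ^ (35 - ic.1).toNat))) < 0
    rw [h2]
    simp only [Int.not, Int.land]
    rw [Int.negSucc_eq]
    omega
  · show Int.negSucc m < 0
    rw [Int.negSucc_eq]
    omega

theorem pvFold_neg (l : List (Int × Char)) : ∀ acc : Int × List Int, acc.1 < 0 →
    (l.foldl pvStepAlt acc).1 < 0 := by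
  induction l with
  | nil => intro acc h; simpa using h
  | cons ic l ih =>
    intro acc h
    rw [List.foldl_cons]
    exact ih _ (pvStep_neg acc.1 acc.2 ic h)

theorem pvFoldlDouble_head (ws : List Int) : ∀ x : Int, ∃ t,
    ws.foldl (fun rs w => rs.flatMap (fun r => [r, r + w])) [x] = x :: t := by
  induction ws with
  | nil => exact fun x => ⟨[], rfl⟩
  | cons w ws ih =>
    intro x
    rw [List.foldl_cons,
      show (([x] : List Int).flatMap (fun r => [r, r + w])) = [x] ++ [x + w] from by simp,
      pvFoldlDouble_append]
    obtain ⟨t, ht⟩ := ih x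
    exact ⟨t ++ _, by rw [ht]; rfl⟩

theorem apply_multi_mask_tight : Claim_exact_apply_multi_mask := by
  intro value mask _ _ hd heq
  unfold D_apply_multi_mask at hd
  have hneg : ((PySem.List.enumerate mask.toList 0).foldl pvStepAlt
      (value, ([] : List Int))).1 < 0 :=
    pvFold_neg _ _ (by simpa using hd)
  obtain ⟨t, ht⟩ := pvFoldlDouble_head
    ((PySem.List.enumerate mask.toList 0).foldl pvStepAlt (value, ([] : List Int))).2
    ((PySem.List.enumerate mask.toList 0).foldl pvStepAlt (value, ([] : List Int))).1
  have halt : apply_multi_mask_alt value mask =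
      ((PySem.List.enumerate mask.toList 0).foldl pvStepAlt (value, ([] : List Int))).1 :: t := by
    simp only [apply_multi_mask_alt]
    exact ht
  have hmem : ((PySem.List.enumerate mask.toList 0).foldl pvStepAlt
      (value, ([] : List Int))).1 ∈ apply_multi_mask value mask := by
    rw [heq, halt]
    exact List.mem_cons_self
  have := pvA_mem_nonneg value mask _ hmem
  omega
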